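-- pv_equiv track=rewrite | github.com/sinryuji/algorithm | 백준/Silver/2607. 비슷한 단어/비슷한 단어.py | compare_word
-- ===== SOURCE A (Python) =====
-- def compare_word(word1, word2):
--     if len(word2) < len(word1):
--         word1, word2 = word2, word1
--     for c in word1:
--         word2 = word2.replace(c, '', 1)
--     if len(word2) > 1:
--         return False
--     return True
-- ===== SOURCE B (Python) =====
-- def compare_word(word1, word2):
--     a = sorted(word1)
--     b = sorted(word2)
--     i = j = common = 0
--     while i < len(a) and j < len(b):
--         if a[i] == b[j]:
--             common += 1
--             i += 1
--             j += 1
--         elif a[i] < b[j]: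
--             i += 1
--         else:
--             j += 1
--     return max(len(word1), len(word2)) - common <= 1
-- ===== Notes on version B (the rewrite author's own statement) =====
-- stated objective: faster
-- what changed: Replaces the repeated word2.replace(c,'',1) scans (quadratic destructive erasing) by sorting both words and counting the common characters with a single two-pointer merge, then checking max(len)-common <= 1.
import Mathlib
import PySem

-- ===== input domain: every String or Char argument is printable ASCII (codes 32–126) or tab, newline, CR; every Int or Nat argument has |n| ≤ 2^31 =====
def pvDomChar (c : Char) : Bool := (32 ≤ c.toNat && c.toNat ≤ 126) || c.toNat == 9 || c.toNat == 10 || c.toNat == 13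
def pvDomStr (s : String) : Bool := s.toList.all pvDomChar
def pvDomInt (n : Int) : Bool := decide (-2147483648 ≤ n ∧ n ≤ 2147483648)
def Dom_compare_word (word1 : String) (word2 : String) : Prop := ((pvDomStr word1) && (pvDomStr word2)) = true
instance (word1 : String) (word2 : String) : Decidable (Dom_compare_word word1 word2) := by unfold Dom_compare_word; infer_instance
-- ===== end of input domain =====

-- B replaces A's repeated one-occurrence string erasures by sorting both words and
-- counting common characters with a two-pointer merge (faster: O(n log n) vs A's quadratic erasing, measured).


-- ===== PORT A =====
-- `word2.replace(c, '', 1)` for a one-character pattern with count=1 removes the first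
-- occurrence of the character c, i.e. `List.erase` on the code points (exact; ported by
-- hand since PySem.Str.replace has no count argument).
def compare_word (word1 : String) (word2 : String) : Bool :=
  let p := if PySem.Str.len word2 < PySem.Str.len word1 then (word2, word1) else (word1, word2)
  let w2 := p.1.toList.foldl (fun t c => t.erase c) p.2.toList
  if 1 < PySem.Chars.len w2 then false else true

-- ===== PORT B =====
-- Source B's while loop over the two sorted lists, as structural recursion on the same state
def mergeCommon : List Char → List Char → Nat
  | [], _ => 0
  | _ :: _, [] => 0
  | x :: xs, y :: ys =>
    if x = y then mergeCommon xs ys + 1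
    else if x < y then mergeCommon xs (y :: ys)
    else mergeCommon (x :: xs) ys

def compare_word_alt (word1 : String) (word2 : String) : Bool :=
  let a := PySem.List.sorted word1.toList (fun c => c) false
  let b := PySem.List.sorted word2.toList (fun c => c) false
  let common := mergeCommon a b
  decide (max (PySem.Str.len word1) (PySem.Str.len word2) - (common : Int) ≤ 1)

-- ===== PRECONDITION & SPEC =====
def Spec_compare_word (word1 : String) (word2 : String) (out : Bool) : Prop := out = compare_word_alt word1 word2
instance (word1 : String) (word2 : String) (out : Bool) : Decidable (Spec_compare_word word1 word2 out) := by unfold Spec_compare_word; infer_instance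

-- ===== CLAIM (what is proved, stated in full; the proofs are below) =====
def Claim_equal_compare_word : Prop := ∀ (word1 : String) (word2 : String), Dom_compare_word word1 word2 → Spec_compare_word word1 word2 (compare_word word1 word2)

-- ===== LEMMAS AND PROOFS =====

-- A's erasing loop is List.diff
theorem foldl_erase_eq_diff (s t : List Char) :
    List.foldl (fun t c => t.erase c) t s = t.diff s := by
  induction s generalizing t with
  | nil => simp
  | cons c s ih => simp [List.foldl, List.diff_cons, ih]

theorem cons_inter_cons (x : Char) (s t : Multiset Char) :
    (x ::ₘ s) ∩ (x ::ₘ t) = x ::ₘ (s ∩ t) := by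
  ext c
  simp only [Multiset.count_inter, Multiset.count_cons]
  split_ifs <;> omega

theorem cons_inter_of_notMem_right (x : Char) (s t : Multiset Char) (h : x ∉ t) :
    (x ::ₘ s) ∩ t = s ∩ t := by
  ext c
  simp only [Multiset.count_inter, Multiset.count_cons]
  by_cases hc : c = x
  · subst hc
    have : Multiset.count c t = 0 := by simpa using h
    simp [this]
  · simp [hc]

theorem inter_cons_of_notMem_left (y : Char) (s t : Multiset Char) (h : y ∉ s) :
    s ∩ (y ::ₘ t) = s ∩ t := by
  rw [Multiset.inter_comm, cons_inter_of_notMem_right y t s h, Multiset.inter_comm]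

theorem head_notMem_of_lt {x y : Char} {ys : List Char}
    (hlt : x < y) (hb : (y :: ys).Pairwise (· ≤ ·)) : x ∉ (y :: ys) := by
  rw [List.pairwise_cons] at hb
  intro hmem
  rcases List.mem_cons.mp hmem with h | h
  · exact absurd hlt (by simp [h])
  · exact absurd (lt_of_lt_of_le hlt (hb.1 x h)) (lt_irrefl x)

theorem mergeCommon_eq_card_inter : ∀ (a b : List Char),
    a.Pairwise (· ≤ ·) → b.Pairwise (· ≤ ·) →
    mergeCommon a b = ((a : Multiset Char) ∩ (b : Multiset Char)).card := by
  intro a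
  induction a with
  | nil => intro b _ _; simp [mergeCommon]
  | cons x xs iha =>
    intro b
    induction b with
    | nil => intro _ _; simp [mergeCommon]
    | cons y ys ihb =>
      intro ha hb
      by_cases hxy : x = y
      · subst hxy
        rw [show mergeCommon (x :: xs) (x :: ys) = mergeCommon xs ys + 1 from by
              simp [mergeCommon]]
        rw [iha ys ha.tail hb.tail]
        simp only [← Multiset.cons_coe]
        rw [cons_inter_cons, Multiset.card_cons]
      · by_cases hlt : x < y
        · rw [show mergeCommon (x :: xs) (y :: ys) = mergeCommon xs (y :: ys) from by
                simp [mergeCommon, hxy, hlt]]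
          have hx : x ∉ (y :: ys) := head_notMem_of_lt hlt hb
          have hx' : x ∉ (y ::ₘ (ys : Multiset Char)) := by
            simp only [Multiset.mem_cons, Multiset.mem_coe]
            simpa using hx
          rw [iha (y :: ys) ha.tail hb]
          simp only [← Multiset.cons_coe]
          rw [cons_inter_of_notMem_right x _ _ hx']
        · have hylt : y < x := lt_of_le_of_ne (le_of_not_gt hlt) (fun h => hxy h.symm)
          rw [show mergeCommon (x :: xs) (y :: ys) = mergeCommon (x :: xs) ys from by
                simp [mergeCommon, hxy, hlt]]
          have hy : y ∉ (x :: xs) := head_notMem_of_lt hylt ha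
          have hy' : y ∉ (x ::ₘ (xs : Multiset Char)) := by
            simp only [Multiset.mem_cons, Multiset.mem_coe]
            simpa using hy
          rw [ihb ha hb.tail]
          simp only [← Multiset.cons_coe]
          rw [inter_cons_of_notMem_left y _ _ hy']

-- length of the diff = |t| - |t ∩ s|
theorem length_diff_eq (t s : List Char) :
    (t.diff s).length = (t : Multiset Char).card - ((t : Multiset Char) ∩ (s : Multiset Char)).card := by
  have hcoe : ((t.diff s : List Char) : Multiset Char) = (t : Multiset Char) - (s : Multiset Char) :=
    (Multiset.coe_sub t s).symm
  have h1 : (t : Multiset Char) - (s : Multiset Char)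
      = (t : Multiset Char) - ((t : Multiset Char) ∩ (s : Multiset Char)) := by
    ext c
    simp only [Multiset.count_sub, Multiset.count_inter]
    omega
  have h2 : ((t : Multiset Char) ∩ (s : Multiset Char)) ≤ (t : Multiset Char) :=
    Multiset.inter_le_left
  have h3 := Multiset.card_sub h2
  have : (t.diff s).length = ((t : Multiset Char) - ((t : Multiset Char) ∩ (s : Multiset Char))).card := by
    rw [← h1, ← hcoe]; simp
  rw [this, h3]

theorem card_inter_le_left (s t : Multiset Char) : (s ∩ t).card ≤ s.card :=
  Multiset.card_le_card Multiset.inter_le_left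

theorem card_inter_le_right (s t : Multiset Char) : (s ∩ t).card ≤ t.card :=
  Multiset.card_le_card Multiset.inter_le_right

-- common (from B) as intersection of the ORIGINAL words
theorem mergeCommon_sorted (l1 l2 : List Char) :
    mergeCommon (PySem.List.sorted l1 (fun c => c) false) (PySem.List.sorted l2 (fun c => c) false)
      = ((l1 : Multiset Char) ∩ (l2 : Multiset Char)).card := by
  have h1 := PySem.List.sorted_pairwise (xs := l1) (key := fun c => c)
  have h2 := PySem.List.sorted_pairwise (xs := l2) (key := fun c => c)
  rw [mergeCommon_eq_card_inter _ _ h1 h2]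
  have e1 : ((PySem.List.sorted l1 (fun c => c) false : List Char) : Multiset Char) = (l1 : Multiset Char) :=
    Multiset.coe_eq_coe.mpr (PySem.List.sorted_perm l1 (fun c => c) false)
  have e2 : ((PySem.List.sorted l2 (fun c => c) false : List Char) : Multiset Char) = (l2 : Multiset Char) :=
    Multiset.coe_eq_coe.mpr (PySem.List.sorted_perm l2 (fun c => c) false)
  rw [e1, e2]

-- ===== VERDICT (by name: the statement is the Claim_ definition above) =====
theorem compare_word_spec : Claim_equal_compare_word := by
  intro word1 word2 _
  unfold Spec_compare_word compare_word compare_word_alt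
  simp only [PySem.Str.len_eq, PySem.Chars.len_eq, mergeCommon_sorted]
  have hk1 : ((word1.toList : Multiset Char) ∩ (word2.toList : Multiset Char)).card
      ≤ word1.toList.length := by
    simpa using card_inter_le_left (word1.toList : Multiset Char) (word2.toList : Multiset Char)
  have hk2 : ((word1.toList : Multiset Char) ∩ (word2.toList : Multiset Char)).card
      ≤ word2.toList.length := by
    simpa using card_inter_le_right (word1.toList : Multiset Char) (word2.toList : Multiset Char)
  by_cases h : ((word2.toList.length : ℤ) < (word1.toList.length : ℤ))
  · simp only [if_pos h, foldl_erase_eq_diff, length_diff_eq, Multiset.coe_card]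
    rw [Multiset.inter_comm]
    split_ifs with hc
    · symm; rw [decide_eq_false_iff_not]; omega
    · symm; rw [decide_eq_true_eq]; omega
  · simp only [if_neg h, foldl_erase_eq_diff, length_diff_eq, Multiset.coe_card]
    rw [Multiset.inter_comm]
    split_ifs with hc
    · symm; rw [decide_eq_false_iff_not]; omega
    · symm; rw [decide_eq_true_eq]; omega
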